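-- pv_equiv track=rewrite | github.com/tanzengehen/kirundi-lemmatize-search | lemmatize_search/kir_prepare_verbs.py | prepare_verb_alternativ
-- ===== SOURCE A (Python) =====
-- def prepare_verb_alternativ(row):
--     """takes: id,lemma,alternative_stem,alternativ_perfectif
--     returns row for the alternatively spelled verb
--     """
--     row_a = row.copy()
--     stem_a = row.get('alternative_stem')
--     perf_a = row.get('alternative_perfective')
--     # lemma = row.get('lemma')
--     perfective_a = ""
--     if perf_a != "":
--         if len(stem_a) > len(perf_a)+1:
--             # only short version of perfective is given
--             # find the last vowel before the ending a:
--             for count_back in range(len(stem_a)-2, 0, -1):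
--                 if stem_a[count_back] in "aeiou":
--                     perfective_a = stem_a[:count_back+1]+perf_a
--                     break
--             # stem_a has only 2 vowels: the very first letter and the ending a
--             if perfective_a == "" and stem_a[0] in "aeiou":
--                 perfective_a = stem_a[:1]+perf_a
--         else:
--             # long version of perfective is already given
--             perfective_a = perf_a
--     else:
--         perfective_a = ""
--     # suppose the first letter of stem and stem_alternative is always the same:
--     # lemma_a = lemma[:2]+stem_a
--     row_a.update({# 'lemma': lemma_a,
--                   'stem': stem_a,
--                   'perfective': perfective_a,
--                   'alternatives': "x"})
--     return row_a
-- ===== SOURCE B (Python) =====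
-- def prepare_verb_alternativ(row):
--     """takes: id,lemma,alternative_stem,alternativ_perfectif
--     returns row for the alternatively spelled verb
--     """
--     stem_a = row.get('alternative_stem')
--     perf_a = row.get('alternative_perfective')
--     if perf_a == "":
--         perfective_a = ""
--     elif len(stem_a) > len(perf_a) + 1:
--         # short perfective given: attach it after the last vowel of stem_a[:-1]
--         idx = max(stem_a.rfind(v, 0, len(stem_a) - 1) for v in "aeiou")
--         perfective_a = stem_a[:idx + 1] + perf_a if idx >= 0 else ""
--     else:
--         perfective_a = perf_a
--     row_a = dict(row)
--     row_a.update({'stem': stem_a,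
--                   'perfective': perfective_a,
--                   'alternatives': "x"})
--     return row_a
-- ===== Notes on version B (the rewrite author's own statement) =====
-- stated objective: idiomatic
-- what changed: The manual backward index loop with break plus the separate stem_a[0] special case are replaced by one max-over-rfind reduction (highest vowel index in stem_a[:-1], -1 if none) followed by a single slice.
-- outside the precondition, e.g. on prepare_verb_alternativ({}): A raises TypeError, B raises TypeError
import Mathlib
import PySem

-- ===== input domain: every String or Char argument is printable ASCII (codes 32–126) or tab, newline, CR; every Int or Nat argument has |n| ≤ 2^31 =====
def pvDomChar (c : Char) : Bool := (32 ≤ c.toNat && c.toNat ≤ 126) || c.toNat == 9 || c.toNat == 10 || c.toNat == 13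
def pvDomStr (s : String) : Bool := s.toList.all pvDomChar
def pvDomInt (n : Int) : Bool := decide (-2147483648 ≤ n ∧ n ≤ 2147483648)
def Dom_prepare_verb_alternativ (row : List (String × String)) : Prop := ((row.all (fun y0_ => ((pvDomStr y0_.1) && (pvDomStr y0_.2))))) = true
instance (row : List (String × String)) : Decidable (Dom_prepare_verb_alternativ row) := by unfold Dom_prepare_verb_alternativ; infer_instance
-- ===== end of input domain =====

-- B replaces A's manual backward vowel scan (with break and a separate stem[0] case)
-- by one max-over-rfind reduction; equivalence of the RETURN value is proved below.

def pvVowels : List Char := ['a', 'e', 'i', 'o', 'u']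

-- ===== PORT A =====
-- perfective computation of A: backward index loop with break, then the stem[0] special case
def pvPerfA (s p : List Char) : List Char :=
  if p ≠ [] then
    if (s.length : Int) > (p.length : Int) + 1 then
      -- for count_back in range(len(stem_a)-2, 0, -1): … break   (Option models the break)
      let found : Option (List Char) :=
        (PySem.List.pyRange ((s.length : Int) - 2) 0 (-1)).foldl
          (fun acc cb =>
            match acc with
            | some r => some r
            | none =>
              if pvVowels.contains (PySem.List.pyGetD s cb ' ') then
                some (PySem.List.slice s none (some (cb + 1)) ++ p)
              else none)
          none
      match found with
      | some r => r
      | none =>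
        -- if perfective_a == "" and stem_a[0] in "aeiou": perfective_a = stem_a[:1]+perf_a
        if pvVowels.contains (PySem.List.pyGetD s 0 ' ') then
          PySem.List.slice s none (some 1) ++ p
        else []
    else p
  else []

def prepare_verb_alternativ (row : List (String × String)) : List (String × String) :=
  let d := PySem.Dict.ofList row
  let stem := d.getD "alternative_stem" ""
  let perf := d.getD "alternative_perfective" ""
  let perfective := pvPerfA stem.toList perf.toList
  (((d.insert "stem" stem).insert "perfective" (String.ofList perfective)).insert
    "alternatives" "x").items

-- ===== PORT B =====
-- s.rfind(c, 0, hi) over the prefix l = s[:hi] (last index of c in l, -1 if absent)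
def pvRfind (l : List Char) (c : Char) : Int :=
  match l.reverse.findIdx? (· == c) with
  | some j => ((l.length - 1 - j : Nat) : Int)
  | none => -1

-- perfective computation of B: highest vowel index in stem[:-1] via max over rfind
def pvPerfB (s p : List Char) : List Char :=
  if p = [] then []
  else if (s.length : Int) > (p.length : Int) + 1 then
    let pre := s.take (s.length - 1)
    let idx : Int := pvVowels.foldl (fun m v => max m (pvRfind pre v)) (-1)
    if 0 ≤ idx then s.take (idx.toNat + 1) ++ p else []
  else p

def prepare_verb_alternativ_alt (row : List (String × String)) : List (String × String) :=
  let d := PySem.Dict.ofList row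
  let stem := d.getD "alternative_stem" ""
  let perf := d.getD "alternative_perfective" ""
  let perfective := pvPerfB stem.toList perf.toList
  (((d.insert "stem" stem).insert "perfective" (String.ofList perfective)).insert
    "alternatives" "x").items

-- ===== PRECONDITION & SPEC =====
-- Pre_ excludes rows missing one of the two keys: Python A then raises TypeError
-- (len(None)), except when the perfective is "" and the stem key is missing, where A
-- returns a row carrying None, which is not a string value of the declared type.
def Pre_prepare_verb_alternativ (row : List (String × String)) : Prop :=
  (row.map Prod.fst).contains "alternative_stem" = true ∧
  (row.map Prod.fst).contains "alternative_perfective" = true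
instance (row : List (String × String)) : Decidable (Pre_prepare_verb_alternativ row) := by
  unfold Pre_prepare_verb_alternativ; infer_instance

def pvWitness_prepare_verb_alternativ : (List (String × String)) :=
  [("id", "7"), ("lemma", "gusaba"), ("alternative_stem", "sabur"), ("alternative_perfective", "ye")]

def Spec_prepare_verb_alternativ (row : List (String × String)) (out : List (String × String)) : Prop := out = prepare_verb_alternativ_alt row
instance (row : List (String × String)) (out : List (String × String)) : Decidable (Spec_prepare_verb_alternativ row out) := by unfold Spec_prepare_verb_alternativ; infer_instance

-- ===== CLAIM (what is proved, stated in full; the proofs are below) =====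
def Claim_equal_prepare_verb_alternativ : Prop := ∀ (row : List (String × String)), Dom_prepare_verb_alternativ row → Pre_prepare_verb_alternativ row → Spec_prepare_verb_alternativ row (prepare_verb_alternativ row)

-- ===== LEMMAS AND PROOFS =====

-- largest vowel index among positions 1..n of s (A's loop region), descending recursion
def pvLastV1 (s : List Char) : Nat → Option Nat
  | 0 => none
  | n + 1 =>
    if pvVowels.contains (s.getD (n + 1) ' ') then some (n + 1) else pvLastV1 s n

-- largest vowel index of a whole list (B's reduction region)
def pvLastV (l : List Char) : Option Nat :=
  match l.reverse.findIdx? (fun c => pvVowels.contains c) with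
  | some j => some (l.length - 1 - j)
  | none => none

lemma pvStepSome (l : List Int) (s p : List Char) (r : List Char) :
    l.foldl
      (fun acc cb =>
        match acc with
        | some r => some r
        | none =>
          if pvVowels.contains (PySem.List.pyGetD s cb ' ') then
            some (PySem.List.slice s none (some (cb + 1)) ++ p)
          else none)
      (some r) = some r := by
  induction l with
  | nil => rfl
  | cons a t ih => exact ih

lemma pvGetD_cast (s : List Char) (m : Nat) :
    PySem.List.pyGetD s ((m : Int)) ' ' = s.getD m ' ' := by
  simpa using PySem.List.pyGetD_natCast (xs := s) (n := m) (d := ' ')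

lemma pvAloop_eq (n : Nat) (s p : List Char) :
    (PySem.List.pyRange (n : Int) 0 (-1)).foldl
      (fun acc cb =>
        match acc with
        | some r => some r
        | none =>
          if pvVowels.contains (PySem.List.pyGetD s cb ' ') then
            some (PySem.List.slice s none (some (cb + 1)) ++ p)
          else none)
      none = (pvLastV1 s n).map (fun k => s.take (k + 1) ++ p) := by
  induction n with
  | zero => simp [PySem.List.pyRange_neg_one_eq_nil, pvLastV1]
  | succ m ih =>
    rw [show ((m + 1 : Nat) : Int) = (m : Int) + 1 by push_cast; ring,
        PySem.List.pyRange_neg_one_cons (by omega)]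
    simp only [List.foldl_cons]
    have hg : PySem.List.pyGetD s ((m : Int) + 1) ' ' = s.getD (m + 1) ' ' := by
      rw [show (m : Int) + 1 = ((m + 1 : Nat) : Int) by push_cast; ring]
      exact pvGetD_cast s (m + 1)
    by_cases hv : pvVowels.contains (s.getD (m + 1) ' ')
    · rw [hg, if_pos hv, pvStepSome]
      have hsl : PySem.List.slice s none (some ((m : Int) + 1 + 1)) = s.take (m + 2) := by
        rw [show (m : Int) + 1 + 1 = ((m + 2 : Nat) : Int) by push_cast; ring,
            PySem.List.slice_to_natCast]
      rw [hsl, pvLastV1, if_pos hv]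
      rfl
    · rw [hg, if_neg hv,
          show (m : Int) + 1 - 1 = (m : Int) by ring, ih, pvLastV1, if_neg hv]

lemma pvLastV_nil : pvLastV [] = none := rfl

lemma pvLastV_append (l : List Char) (c : Char) :
    pvLastV (l ++ [c]) = if pvVowels.contains c then some l.length else pvLastV l := by
  unfold pvLastV
  have hrev : (l ++ [c]).reverse = c :: l.reverse := by simp
  rw [hrev, List.findIdx?_cons]
  by_cases hc : pvVowels.contains c
  · rw [if_pos hc, if_pos hc]
    simp
  · rw [if_neg hc, if_neg hc]
    cases h : l.reverse.findIdx? (fun c => pvVowels.contains c) with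
    | none => simp [h]
    | some j =>
      simp only [h, Option.map_some, List.length_append, List.length_cons, List.length_nil]
      congr 1
      omega

lemma pvRfind_append (l : List Char) (c' c : Char) :
    pvRfind (l ++ [c']) c = if c' == c then (l.length : Int) else pvRfind l c := by
  unfold pvRfind
  have hrev : (l ++ [c']).reverse = c' :: l.reverse := by simp
  rw [hrev, List.findIdx?_cons]
  by_cases hc : c' == c
  · rw [if_pos hc, if_pos hc]
    simp
  · rw [if_neg hc, if_neg hc]
    cases h : l.reverse.findIdx? (· == c) with
    | none => simp [h]
    | some j =>
      simp only [h, Option.map_some, List.length_append, List.length_cons, List.length_nil]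
      congr 1
      omega

lemma pvRfind_bounds (l : List Char) (c : Char) :
    -1 ≤ pvRfind l c ∧ pvRfind l c ≤ (l.length : Int) - 1 := by
  unfold pvRfind
  cases h : l.reverse.findIdx? (· == c) with
  | none => simp only [h]; constructor <;> omega
  | some j =>
    have hj : j < l.reverse.length := (List.findIdx?_eq_some_iff_findIdx_eq.mp h).1
    simp only [List.length_reverse] at hj
    simp only [h]
    constructor <;> omega

lemma pvBidx_eq (l : List Char) :
    pvVowels.foldl (fun m v => max m (pvRfind l v)) (-1)
      = (pvLastV l).elim (-1) (fun k => (k : Int)) := by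
  induction l using List.reverseRecOn with
  | nil => decide
  | append_singleton l c ih =>
    rw [pvLastV_append]
    by_cases hc : pvVowels.contains c
    · rw [if_pos hc]
      have hc' : c = 'a' ∨ c = 'e' ∨ c = 'i' ∨ c = 'o' ∨ c = 'u' := by
        simpa [pvVowels] using hc
      have b1 := pvRfind_bounds l 'a'
      have b2 := pvRfind_bounds l 'e'
      have b3 := pvRfind_bounds l 'i'
      have b4 := pvRfind_bounds l 'o'
      have b5 := pvRfind_bounds l 'u'
      simp only [pvVowels, List.foldl_cons, List.foldl_nil]
      simp only [pvRfind_append, Option.elim_some]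
      rcases hc' with h | h | h | h | h <;> subst h <;>
        simp only [beq_self_eq_true, ↓reduceIte, show (('a' == 'e') = false) by decide,
          show (('a' == 'i') = false) by decide, show (('a' == 'o') = false) by decide,
          show (('a' == 'u') = false) by decide, show (('e' == 'a') = false) by decide,
          show (('e' == 'i') = false) by decide, show (('e' == 'o') = false) by decide,
          show (('e' == 'u') = false) by decide, show (('i' == 'a') = false) by decide,
          show (('i' == 'e') = false) by decide, show (('i' == 'o') = false) by decide,
          show (('i' == 'u') = false) by decide, show (('o' == 'a') = false) by decide,
          show (('o' == 'e') = false) by decide, show (('o' == 'i') = false) by decide,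
          show (('o' == 'u') = false) by decide, show (('u' == 'a') = false) by decide,
          show (('u' == 'e') = false) by decide, show (('u' == 'i') = false) by decide,
          show (('u' == 'o') = false) by decide, Bool.false_eq_true] <;> omega
    · rw [if_neg hc]
      have hc' : ¬ (c = 'a' ∨ c = 'e' ∨ c = 'i' ∨ c = 'o' ∨ c = 'u') := by
        simpa [pvVowels] using hc
      push_neg at hc'
      obtain ⟨h1, h2, h3, h4, h5⟩ := hc'
      simp only [pvVowels, List.foldl_cons, List.foldl_nil] at ih ⊢
      simp only [pvRfind_append, show (c == 'a') = false by simpa using h1,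
        show (c == 'e') = false by simpa using h2,
        show (c == 'i') = false by simpa using h3,
        show (c == 'o') = false by simpa using h4,
        show (c == 'u') = false by simpa using h5, Bool.false_eq_true, ↓reduceIte]
      exact ih

lemma pvBridge (s : List Char) (n : Nat) (h : n + 1 ≤ s.length) :
    pvLastV (s.take (n + 1))
      = match pvLastV1 s n with
        | some k => some k
        | none => if pvVowels.contains (s.getD 0 ' ') then some 0 else none := by
  induction n with
  | zero =>
    cases s with
    | nil => simp at h
    | cons c t =>
      rw [show (c :: t).take 1 = [] ++ [c] from rfl, pvLastV_append]
      simp [pvLastV1, pvLastV_nil]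
  | succ m ih =>
    have hx : m + 1 < s.length := by omega
    rw [List.take_succ_eq_append_getElem hx, pvLastV_append]
    have hget : s.getD (m + 1) ' ' = s[m + 1]'hx := List.getD_eq_getElem s ' ' hx
    by_cases hv : pvVowels.contains (s[m + 1]'hx) = true
    · rw [if_pos hv, List.length_take, pvLastV1, hget, if_pos hv]
      congr 1
      omega
    · rw [if_neg hv, pvLastV1, hget, if_neg hv]
      exact ih (by omega)

lemma pvPerf_eq (s p : List Char) : pvPerfA s p = pvPerfB s p := by
  unfold pvPerfA pvPerfB
  by_cases hp : p = []
  · simp [hp]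
  · rw [if_pos hp, if_neg hp]
    by_cases hlen : (s.length : Int) > (p.length : Int) + 1
    · rw [if_pos hlen, if_pos hlen]
      have hp1 : 1 ≤ p.length := List.length_pos_iff.mpr hp
      have hs3 : 3 ≤ s.length := by omega
      rw [show ((s.length : Int) - 2) = ((s.length - 2 : Nat) : Int) by omega,
          pvAloop_eq (s.length - 2) s p,
          show s.take (s.length - 1) = s.take ((s.length - 2) + 1) by congr 1; omega]
      dsimp only
      rw [pvBidx_eq, pvBridge s (s.length - 2) (by omega)]
      cases hL : pvLastV1 s (s.length - 2) with
      | some k =>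
        simp only [Option.map_some, Option.elim_some]
        rw [if_pos (Int.natCast_nonneg k)]
        simp
      | none =>
        simp only [Option.map_none]
        by_cases hv0 : pvVowels.contains (s.getD 0 ' ')
        · simp only [PySem.List.pyGetD_zero, hv0, ↓reduceIte, Option.elim_some]
          simp [PySem.List.slice_to]
        · have hv0f : pvVowels.contains (s.getD 0 ' ') = false := by simpa using hv0
          simp only [PySem.List.pyGetD_zero, hv0f, Bool.false_eq_true, ↓reduceIte,
            Option.elim_none]
          norm_num
    · rw [if_neg hlen, if_neg hlen]

-- ===== VERDICT (by name: the statement is the Claim_ definition above) =====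
theorem prepare_verb_alternativ_spec : Claim_equal_prepare_verb_alternativ := by
  intro row _ _
  unfold Spec_prepare_verb_alternativ prepare_verb_alternativ prepare_verb_alternativ_alt
  simp [pvPerf_eq]
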